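-- pv_equiv track=rewrite | github.com/JasperOosterbroek/ArnoldCInterpreter | parser.py | longestListInList
-- ===== SOURCE A (Python) =====
-- def longestListInList(list, count = 0):
--     if count == len(list) - 1:
--         return list[count]
--     prevLongest = longestListInList(list, count+1)
--     if list[count] is not None:
--         if prevLongest is None:
--             return list[count]
--         if len(prevLongest) > len(list[count]):
--             return prevLongest
--         else:
--             return list[count]
--     return None
-- ===== SOURCE B (Python) =====
-- def longestListInList(list, count=0):
--     best = None
--     for i in range(count, len(list)):
--         cur = list[i]
--         if cur is None:
--             break
--         if best is None or len(cur) > len(best):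
--             best = cur
--     return best
-- ===== Notes on version B (the rewrite author's own statement) =====
-- stated objective: simpler
-- what changed: Replaced the backward suffix recursion (recurse to the end, combine on unwinding, None resets the best) by a single forward scan that stops at the first None and keeps the first longest element seen; no recursion and no post-combination.
-- crash fix: On inputs with count >= len(list) (including the empty list with count >= 0) A never reaches its base case and raises RecursionError, while B's empty range makes it return None. — e.g. on longestListInList([], 0): A raises RecursionError, B returns none
import Mathlib
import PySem

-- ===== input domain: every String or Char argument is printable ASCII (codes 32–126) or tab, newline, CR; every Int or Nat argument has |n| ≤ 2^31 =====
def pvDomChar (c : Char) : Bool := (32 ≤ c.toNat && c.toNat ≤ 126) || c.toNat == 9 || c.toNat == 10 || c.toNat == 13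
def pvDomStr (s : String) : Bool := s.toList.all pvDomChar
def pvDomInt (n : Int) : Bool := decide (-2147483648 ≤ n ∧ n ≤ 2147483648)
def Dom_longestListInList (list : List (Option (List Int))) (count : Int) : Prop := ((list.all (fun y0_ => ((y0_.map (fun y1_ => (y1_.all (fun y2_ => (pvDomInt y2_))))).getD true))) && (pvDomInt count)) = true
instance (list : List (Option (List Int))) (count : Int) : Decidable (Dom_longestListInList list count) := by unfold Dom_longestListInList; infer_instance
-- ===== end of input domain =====

-- B replaces A's backward suffix recursion by a single forward scan that stops at the
-- first None and keeps the first longest element seen (simpler: no recursion, early exit).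

-- ===== PORT A =====
-- list[i] (possibly negative index); none also stands for the out-of-range case, which
-- Pre_ excludes (Python raises IndexError there).
def pvAt (l : List (Option (List Int))) (i : Int) : Option (List Int) :=
  (PySem.List.pyGet? l i).getD none

-- A's recursion, with a fuel bound (the fuel passed below suffices on every input where
-- the Python terminates; where it runs out Python diverges/raises, outside Pre_).
def longA (l : List (Option (List Int))) : Nat → Int → Option (List Int)
  | 0, _ => none
  | f + 1, c =>
    if c = (l.length : Int) - 1 then pvAt l c
    else
      let prevLongest := longA l f (c + 1)
      match pvAt l c with
      | none => none
      | some cur =>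
        match prevLongest with
        | none => some cur
        | some p => if p.length > cur.length then some p else some cur

def longestListInList (list : List (Option (List Int))) (count : Int) : Option (List Int) :=
  longA list (((list.length : Int) - count).toNat + 1) count

-- ===== PORT B =====
-- B's for-loop over range(count, len(list)) with an early break at the first None.
def loopB (l : List (Option (List Int))) : List Int → Option (List Int) → Option (List Int)
  | [], best => best
  | i :: rest, best =>
    match pvAt l i with
    | none => best                      -- 'if cur is None: break'
    | some cur =>
      loopB l rest (match best with
        | none => some cur
        | some b => if cur.length > b.length then some cur else some b)

def longestListInList_alt (list : List (Option (List Int))) (count : Int) : Option (List Int) :=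
  loopB list (PySem.List.pyRange count (list.length : Int) 1) none

-- ===== PRECONDITION & SPEC =====
-- Exactly the inputs where Python A returns: the start index must be a valid (possibly
-- negative) index, else A raises IndexError or RecursionError.
def Pre_longestListInList (list : List (Option (List Int))) (count : Int) : Prop :=
  -(list.length : Int) ≤ count ∧ count < (list.length : Int)
instance (list : List (Option (List Int))) (count : Int) : Decidable (Pre_longestListInList list count) := by unfold Pre_longestListInList; infer_instance

def pvWitness_longestListInList : List (Option (List Int)) × Int := ([some [1, 2], none, some [3]], 0)

-- On inputs with count ≥ len(list) (including the empty list with count ≥ 0) A never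
-- reaches its base case and raises RecursionError, while B returns None (empty range).
def Raises_longestListInList (list : List (Option (List Int))) (count : Int) : Prop :=
  (list.length : Int) ≤ count
instance (list : List (Option (List Int))) (count : Int) : Decidable (Raises_longestListInList list count) := by unfold Raises_longestListInList; infer_instance
def pvRaiseWitness_longestListInList : List (Option (List Int)) × Int := ([], 0)
def pvRaiseWitnessOut_longestListInList : Option (List Int) := none

def Spec_longestListInList (list : List (Option (List Int))) (count : Int) (out : Option (List Int)) : Prop := out = longestListInList_alt list count
instance (list : List (Option (List Int))) (count : Int) (out : Option (List Int)) : Decidable (Spec_longestListInList list count out) := by unfold Spec_longestListInList; infer_instance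

-- ===== CLAIM (what is proved, stated in full; the proofs are below) =====
def Claim_equal_longestListInList : Prop := ∀ (list : List (Option (List Int))) (count : Int), Dom_longestListInList list count → Pre_longestListInList list count → Spec_longestListInList list count (longestListInList list count)
def Claim_raises_longestListInList : Prop := (∀ (list : List (Option (List Int))) (count : Int), Dom_longestListInList list count → Raises_longestListInList list count → ¬ Pre_longestListInList list count) ∧ (Dom_longestListInList (pvRaiseWitness_longestListInList.1) (pvRaiseWitness_longestListInList.2) ∧ Raises_longestListInList (pvRaiseWitness_longestListInList.1) (pvRaiseWitness_longestListInList.2) ∧ longestListInList_alt (pvRaiseWitness_longestListInList.1) (pvRaiseWitness_longestListInList.2) = pvRaiseWitnessOut_longestListInList)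

-- ===== LEMMAS AND PROOFS =====

-- pvMerge best r : the effect of B's accumulator best on the result r of the rest of the scan.
def pvMerge (x y : Option (List Int)) : Option (List Int) :=
  match y with
  | none => x
  | some c =>
    match x with
    | none => some c
    | some b => if c.length > b.length then some c else some b

theorem pvMerge_none_left (x : Option (List Int)) : pvMerge none x = x := by
  cases x <;> rfl

set_option maxHeartbeats 1000000 in
theorem pvMerge_assoc (a b c : Option (List Int)) :
    pvMerge (pvMerge a b) c = pvMerge a (pvMerge b c) := by
  rcases a with _ | a
  · simp [pvMerge_none_left]
  · rcases b with _ | b <;> rcases c with _ | c <;> try rfl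
    by_cases h1 : b.length > a.length <;> by_cases h2 : c.length > b.length
    · have h3 : c.length > a.length := by omega
      simp [pvMerge, h1, h2, h3]
    · simp [pvMerge, h1, h2]
    · simp [pvMerge, h1, h2]
    · have h3 : ¬ c.length > a.length := by omega
      simp [pvMerge, h1, h2, h3]

-- A's step, phrased with pvMerge (the combine in A's else-branch is exactly pvMerge (some cur) ·).
theorem longA_succ_eq (l : List (Option (List Int))) (f : Nat) (c : Int)
    (h : ¬ c = (l.length : Int) - 1) :
    longA l (f + 1) c = match pvAt l c with
      | none => none
      | some cur => pvMerge (some cur) (longA l f (c + 1)) := by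
  simp only [longA, if_neg h]
  cases pvAt l c with
  | none => rfl
  | some cur => cases longA l f (c + 1) <;> rfl

-- Key invariant: B's scan from c with accumulator best equals pvMerge best (A's value from c),
-- for any sufficient fuel.
set_option maxHeartbeats 1000000 in
theorem loopB_eq_merge (l : List (Option (List Int))) (f : Nat) :
    ∀ (c : Int) (best : Option (List Int)), c < (l.length : Int) →
      (l.length : Int) - c ≤ (f : Int) + 1 →
      loopB l (PySem.List.pyRange c (l.length : Int) 1) best = pvMerge best (longA l (f + 1) c) := by
  induction f with
  | zero =>
    intro c best hc hf
    have hbase : c = (l.length : Int) - 1 := by omega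
    rw [PySem.List.pyRange_one_cons hc,
        PySem.List.pyRange_one_eq_nil (a := c + 1) (b := (l.length : Int)) (by omega)]
    cases h : pvAt l c with
    | none => simp only [loopB, h, longA, if_pos hbase]; rfl
    | some cur =>
      simp only [loopB, h, longA, if_pos hbase]
      cases best <;> rfl
  | succ f ih =>
    intro c best hc hf
    rw [PySem.List.pyRange_one_cons hc]
    by_cases hbase : c = (l.length : Int) - 1
    · rw [PySem.List.pyRange_one_eq_nil (a := c + 1) (b := (l.length : Int)) (by omega)]
      cases h : pvAt l c with
      | none => simp only [loopB, h, longA, if_pos hbase]; rfl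
      | some cur =>
        simp only [loopB, h, longA, if_pos hbase]
        cases best <;> rfl
    · rw [longA_succ_eq l (f + 1) c hbase]
      cases h : pvAt l c with
      | none => simp only [loopB, h]; rfl
      | some cur =>
        cases best with
        | none =>
          simp only [loopB, h, pvMerge_none_left]
          exact ih (c + 1) (some cur) (by omega) (by omega)
        | some b =>
          simp only [loopB, h]
          have hupd : (if cur.length > b.length then some cur else some b : Option (List Int)) =
              pvMerge (some b) (some cur) := rfl
          rw [hupd, ih (c + 1) (pvMerge (some b) (some cur)) (by omega) (by omega)]
          exact pvMerge_assoc _ _ _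

theorem ports_agree (l : List (Option (List Int))) (c : Int) (hc : c < (l.length : Int)) :
    longestListInList l c = longestListInList_alt l c := by
  unfold longestListInList longestListInList_alt
  rw [loopB_eq_merge l (((l.length : Int) - c).toNat) c none hc (by omega),
      pvMerge_none_left]

-- ===== VERDICT (by name: the statement is the Claim_ definition above) =====
theorem longestListInList_spec : Claim_equal_longestListInList := by
  intro l c _ hpre
  unfold Spec_longestListInList
  exact ports_agree l c hpre.2

@[simp] theorem longestListInList_raises : Claim_raises_longestListInList := by
  unfold Claim_raises_longestListInList
  exact ⟨fun l c _ hr hpre => by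
    unfold Raises_longestListInList at hr
    unfold Pre_longestListInList at hpre
    omega, by decide⟩
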